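-- pv_equiv track=rewrite | github.com/ELC1657/OSINTMeridian | meridian/splash.py | _build_solid
-- ===== SOURCE A (Python) =====
-- def _build_solid(rows: int, cols: int,
--                  logo_lines: list[str], logo_y: int, logo_x: int
--                  ) -> list[list[bool]]:
--     solid = [[False] * cols for _ in range(rows)]
--     for ly, line in enumerate(logo_lines):
--         gy = logo_y + ly
--         if gy < 0 or gy >= rows:
--             continue
--         for lx, ch in enumerate(line):
--             gx = logo_x + lx
--             if ch not in (' ', '\n', '\r') and 0 <= gx < cols:
--                 solid[gy][gx] = True
--     return solid
-- ===== SOURCE B (Python) =====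
-- def _build_solid(rows: int, cols: int,
--                  logo_lines: list[str], logo_y: int, logo_x: int
--                  ) -> list[list[bool]]:
--     # Build each row directly: row r is covered by exactly the logo line with
--     # index r - logo_y (if any); each cell is computed by lookup, no mutation.
--     def row(r):
--         ly = r - logo_y
--         if 0 <= ly < len(logo_lines):
--             line = logo_lines[ly]
--             return [logo_x <= c < logo_x + len(line)
--                     and line[c - logo_x] not in (' ', '\n', '\r')
--                     for c in range(cols)]
--         return [False] * cols
--     return [row(r) for r in range(rows)]
-- ===== Notes on version B (the rewrite author's own statement) =====
-- stated objective: alternative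
-- what changed: Instead of allocating an all-False grid and mutating cells while scanning the logo lines, B generates the grid cell-by-cell: each output row r is computed directly from the unique logo line r - logo_y (if any) by an index lookup per column, with no mutable grid at all.
import Mathlib
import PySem

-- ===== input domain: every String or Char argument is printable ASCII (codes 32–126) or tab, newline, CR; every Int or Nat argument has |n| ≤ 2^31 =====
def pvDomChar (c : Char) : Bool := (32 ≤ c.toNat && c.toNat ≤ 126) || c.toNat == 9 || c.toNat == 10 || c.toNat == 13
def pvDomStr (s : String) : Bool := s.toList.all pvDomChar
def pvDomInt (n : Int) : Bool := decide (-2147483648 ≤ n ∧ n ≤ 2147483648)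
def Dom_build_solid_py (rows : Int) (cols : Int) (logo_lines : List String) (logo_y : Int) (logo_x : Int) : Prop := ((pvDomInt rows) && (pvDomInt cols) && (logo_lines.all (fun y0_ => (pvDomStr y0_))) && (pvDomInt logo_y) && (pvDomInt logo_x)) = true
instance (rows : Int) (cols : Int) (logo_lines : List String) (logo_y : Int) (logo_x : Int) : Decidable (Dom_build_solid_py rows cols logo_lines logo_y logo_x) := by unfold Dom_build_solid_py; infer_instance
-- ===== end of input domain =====

-- B replaces A's allocate-then-mutate grid by direct cell generation: each output
-- row is computed from the unique logo line that can cover it (alternative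
-- decomposition; return values proved equal).

-- ===== PORT A =====
-- inner loop body: for lx, ch in enumerate(line): if ch not in (' ','\n','\r') and 0 <= gx < cols: solid[gy][gx] = True
-- (gx = logo_x + q.1, written inline)
def pyInnerStep (cols : Int) (logo_x : Int) (gy : Int) (solid : List (List Bool)) (q : Int × Char) : List (List Bool) :=
  if q.2 ∉ [' ', '\n', '\r'] ∧ 0 ≤ logo_x + q.1 ∧ logo_x + q.1 < cols then
    solid.modify gy.toNat (fun row => row.set (logo_x + q.1).toNat true)
  else solid

-- outer loop body (gy = logo_y + p.1, written inline):
-- for ly, line in enumerate(logo_lines): gy = logo_y + ly; if gy < 0 or gy >= rows: continue; <inner loop>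
def pyOuterStep (rows : Int) (cols : Int) (logo_y : Int) (logo_x : Int) (solid : List (List Bool)) (p : Int × String) : List (List Bool) :=
  if logo_y + p.1 < 0 ∨ rows ≤ logo_y + p.1 then solid
  else (PySem.List.enumerate p.2.toList 0).foldl (pyInnerStep cols logo_x (logo_y + p.1)) solid

def build_solid_py (rows : Int) (cols : Int) (logo_lines : List String) (logo_y : Int) (logo_x : Int) : List (List Bool) :=
  let solid := (PySem.List.pyRange 0 rows 1).map (fun _ => List.replicate cols.toNat false)
  (PySem.List.enumerate logo_lines 0).foldl (pyOuterStep rows cols logo_y logo_x) solid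

-- ===== PORT B =====
def build_solid_py_alt (rows : Int) (cols : Int) (logo_lines : List String) (logo_y : Int) (logo_x : Int) : List (List Bool) :=
  (PySem.List.pyRange 0 rows 1).map (fun r =>
    let ly := r - logo_y
    if 0 ≤ ly ∧ ly < (logo_lines.length : Int) then
      -- line = logo_lines[ly]; the index was just checked in range, so getD is exact
      let chars := (logo_lines.getD ly.toNat "").toList
      (PySem.List.pyRange 0 cols 1).map (fun c =>
        decide ((logo_x ≤ c ∧ c < logo_x + (chars.length : Int)) ∧
                chars.getD (c - logo_x).toNat ' ' ∉ [' ', '\n', '\r']))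
    else List.replicate cols.toNat false)

-- ===== PRECONDITION & SPEC =====
def Spec_build_solid_py (rows : Int) (cols : Int) (logo_lines : List String) (logo_y : Int) (logo_x : Int) (out : List (List Bool)) : Prop := out = build_solid_py_alt rows cols logo_lines logo_y logo_x
instance (rows : Int) (cols : Int) (logo_lines : List String) (logo_y : Int) (logo_x : Int) (out : List (List Bool)) : Decidable (Spec_build_solid_py rows cols logo_lines logo_y logo_x out) := by unfold Spec_build_solid_py; infer_instance

-- ===== CLAIM (what is proved, stated in full; the proofs are below) =====
def Claim_equal_build_solid_py : Prop := ∀ (rows : Int) (cols : Int) (logo_lines : List String) (logo_y : Int) (logo_x : Int), Dom_build_solid_py rows cols logo_lines logo_y logo_x → Spec_build_solid_py rows cols logo_lines logo_y logo_x (build_solid_py rows cols logo_lines logo_y logo_x)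

-- ===== LEMMAS AND PROOFS =====

-- row-level view of A's inner loop, with explicit start index s
def pvRowFun (cols : Int) (logo_x : Int) : List Char → Int → List Bool → List Bool
  | [], _, row => row
  | ch :: cs, s, row =>
      pvRowFun cols logo_x cs (s + 1)
        (if ch ∉ [' ', '\n', '\r'] ∧ 0 ≤ logo_x + s ∧ logo_x + s < cols
         then row.set (logo_x + s).toNat true else row)

theorem pvRowFun_cons (cols logo_x : Int) (ch : Char) (cs : List Char) (s : Int)
    (row : List Bool) :
    pvRowFun cols logo_x (ch :: cs) s row
      = pvRowFun cols logo_x cs (s + 1)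
          (if ch ∉ [' ', '\n', '\r'] ∧ 0 ≤ logo_x + s ∧ logo_x + s < cols
           then row.set (logo_x + s).toNat true else row) := rfl

theorem pv_modify_id {α : Type} (l : List α) (i : Nat) : l.modify i (fun x => x) = l := by
  apply List.ext_getElem (by simp)
  intro j h1 h2
  simp [List.getElem_modify]

theorem pv_modify_modify {α : Type} (l : List α) (i : Nat) (f g : α → α) :
    (l.modify i f).modify i g = l.modify i (fun x => g (f x)) := by
  apply List.ext_getElem (by simp)
  intro j h1 h2
  simp [List.getElem_modify]
  split_ifs <;> simp

theorem pv_getD_modify_self {α : Type} (l : List α) (i : Nat) (f : α → α) (d : α)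
    (h : i < l.length) : (l.modify i f).getD i d = f (l.getD i d) := by
  simp [List.getD_eq_getElem?_getD, List.getElem?_eq_getElem h]

theorem pv_getD_modify_ne {α : Type} (l : List α) (i j : Nat) (f : α → α) (d : α)
    (h : i ≠ j) : (l.modify i f).getD j d = l.getD j d := by
  simp [List.getD_eq_getElem?_getD, h]

theorem pv_getD_set_self (row : List Bool) (i : Nat) (h : i < row.length) :
    (row.set i true).getD i false = true := by
  simp [List.getD_eq_getElem?_getD, h]

theorem pv_getD_set_ne (row : List Bool) (i c : Nat) (h : i ≠ c) :
    (row.set i true).getD c false = row.getD c false := by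
  simp [List.getD_eq_getElem?_getD, h]

theorem pv_inner_eq_modify (cols logo_x gy : Int) (chars : List Char) (s : Int)
    (solid : List (List Bool)) :
    (PySem.List.enumerate chars s).foldl (pyInnerStep cols logo_x gy) solid
      = solid.modify gy.toNat (pvRowFun cols logo_x chars s) := by
  induction chars generalizing s solid with
  | nil => simp [PySem.List.enumerate_nil, pvRowFun, pv_modify_id]
  | cons ch cs ih =>
      rw [PySem.List.enumerate_cons, List.foldl_cons, ih]
      rw [pyInnerStep]
      split_ifs with h
      · rw [pv_modify_modify]
        congr 1
        funext row
        rw [pvRowFun_cons, if_pos h]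
      · congr 1
        funext row
        rw [pvRowFun_cons, if_neg h]

theorem pv_length_pvRowFun (cols logo_x : Int) (chars : List Char) (s : Int) (row : List Bool) :
    (pvRowFun cols logo_x chars s row).length = row.length := by
  induction chars generalizing s row with
  | nil => rfl
  | cons ch cs ih =>
      rw [pvRowFun_cons, ih]
      split_ifs <;> simp

theorem pv_length_outerStep (rows cols logo_y logo_x : Int) (solid : List (List Bool))
    (p : Int × String) :
    (pyOuterStep rows cols logo_y logo_x solid p).length = solid.length := by
  unfold pyOuterStep
  split_ifs with h
  · rfl
  · rw [pv_inner_eq_modify]; simp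

theorem pv_length_outerFold (rows cols logo_y logo_x : Int) (l : List String) (s : Int)
    (solid : List (List Bool)) :
    ((PySem.List.enumerate l s).foldl (pyOuterStep rows cols logo_y logo_x) solid).length
      = solid.length := by
  induction l generalizing s solid with
  | nil => simp [PySem.List.enumerate_nil]
  | cons hd tl ih =>
      rw [PySem.List.enumerate_cons, List.foldl_cons, ih, pv_length_outerStep]

-- what A's inner loop leaves in cell c of the row
theorem pv_rowFun_getD (cols logo_x : Int) (chars : List Char) (s : Int) (row : List Bool)
    (c : Nat) (hc : (c : Int) < cols) (hcl : c < row.length) :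
    (pvRowFun cols logo_x chars s row).getD c false =
      (if s ≤ (c : Int) - logo_x ∧ (c : Int) - logo_x < s + chars.length ∧
          (chars.getD ((c : Int) - logo_x - s).toNat ' ') ∉ [' ', '\n', '\r'] then true
       else row.getD c false) := by
  induction chars generalizing s row with
  | nil =>
      rw [pvRowFun, if_neg]
      simp only [List.length_nil]
      omega
  | cons ch cs ih =>
      rw [pvRowFun_cons]
      by_cases hx : (c : Int) - logo_x = s
      · -- this character lands exactly on column c
        have hgx : (logo_x + s).toNat = c := by omega
        by_cases hok : ch ∉ [' ', '\n', '\r']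
        · rw [if_pos ⟨hok, by omega, by omega⟩]
          rw [ih (s + 1) _ (by simpa using hcl)]
          rw [if_neg (by omega), hgx, pv_getD_set_self _ _ hcl]
          rw [if_pos]
          refine ⟨by omega, by simp only [List.length_cons]; push_cast; omega, ?_⟩
          have h0 : ((c : Int) - logo_x - s).toNat = 0 := by omega
          simpa [h0] using hok
        · rw [if_neg (fun hh => hok hh.1)]
          rw [ih (s + 1) _ hcl]
          rw [if_neg (by omega), if_neg]
          intro hh
          have h0 : ((c : Int) - logo_x - s).toNat = 0 := by omega
          rw [h0] at hh
          exact hok (by simpa using hh.2.2)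
      · -- a different column: the possible set does not touch c
        have hrow : ∀ row' : List Bool,
            (if ch ∉ [' ', '\n', '\r'] ∧ 0 ≤ logo_x + s ∧ logo_x + s < cols
             then row'.set (logo_x + s).toNat true else row').getD c false
              = row'.getD c false := by
          intro row'
          split_ifs with h
          · exact pv_getD_set_ne _ _ _ (by omega)
          · rfl
        rw [ih (s + 1) _ (by split_ifs <;> simp [hcl])]
        by_cases hb : s + 1 ≤ (c : Int) - logo_x ∧ (c : Int) - logo_x < s + 1 + cs.length
        · have hi : ((c : Int) - logo_x - s).toNat = ((c : Int) - logo_x - (s + 1)).toNat + 1 := by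
            omega
          rw [hrow]
          by_cases hch : (cs.getD ((c : Int) - logo_x - (s + 1)).toNat ' ') ∉ [' ', '\n', '\r']
          · rw [if_pos ⟨hb.1, hb.2, hch⟩, if_pos]
            refine ⟨by omega, by simp only [List.length_cons]; push_cast; omega, ?_⟩
            rw [hi, List.getD_cons_succ]
            exact hch
          · rw [if_neg (fun hh => hch hh.2.2), if_neg]
            intro hh
            rw [hi, List.getD_cons_succ] at hh
            exact hch hh.2.2
        · rw [hrow]
          rw [if_neg (by omega), if_neg]
          intro hh
          have := hh.1; have := hh.2.1
          simp only [List.length_cons] at *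
          omega

-- what A's outer loop leaves in row r of the grid
theorem pv_outer_getD (rows cols logo_y logo_x : Int) (l : List String) (s : Int)
    (solid : List (List Bool)) (r : Nat) (hr : (r : Int) < rows) (hlen : r < solid.length) :
    ((PySem.List.enumerate l s).foldl (pyOuterStep rows cols logo_y logo_x) solid).getD r []
      = (if s ≤ (r : Int) - logo_y ∧ (r : Int) - logo_y < s + l.length then
           pvRowFun cols logo_x ((l.getD ((r : Int) - logo_y - s).toNat "").toList) 0
             (solid.getD r [])
         else solid.getD r []) := by
  induction l generalizing s solid with
  | nil =>
      rw [PySem.List.enumerate_nil, List.foldl_nil, if_neg]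
      simp only [List.length_nil]
      omega
  | cons hd tl ih =>
      rw [PySem.List.enumerate_cons, List.foldl_cons]
      rw [ih (s + 1) _ (by rw [pv_length_outerStep]; exact hlen)]
      by_cases hx : (r : Int) - logo_y = s
      · have hgy : (logo_y + s).toNat = r := by omega
        have hstep : pyOuterStep rows cols logo_y logo_x solid (s, hd)
            = solid.modify r (pvRowFun cols logo_x hd.toList 0) := by
          rw [pyOuterStep, if_neg (by simp only []; omega)]
          rw [pv_inner_eq_modify]
          simp only []
          rw [hgy]
        rw [if_neg (by omega), hstep, pv_getD_modify_self _ _ _ _ hlen]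
        rw [if_pos ⟨by omega, by simp only [List.length_cons]; push_cast; omega⟩]
        have h0 : ((r : Int) - logo_y - s).toNat = 0 := by omega
        rw [h0, List.getD_cons_zero]
      · have hstep : (pyOuterStep rows cols logo_y logo_x solid (s, hd)).getD r []
            = solid.getD r [] := by
          rw [pyOuterStep]
          split_ifs with h
          · rfl
          · rw [pv_inner_eq_modify]
            exact pv_getD_modify_ne _ _ _ _ _ (by simp only [] at h; omega)
        rw [hstep]
        by_cases hb : s + 1 ≤ (r : Int) - logo_y ∧ (r : Int) - logo_y < s + 1 + tl.length
        · have hi : ((r : Int) - logo_y - s).toNat = ((r : Int) - logo_y - (s + 1)).toNat + 1 := by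
            omega
          rw [if_pos hb, if_pos ⟨by omega, by simp only [List.length_cons]; push_cast; omega⟩, hi, List.getD_cons_succ]
        · rw [if_neg (by omega), if_neg]
          intro hh
          have := hh.1; have := hh.2
          simp only [List.length_cons] at *
          omega

-- A's inner loop on a fresh all-False row equals B's generated row
theorem pv_row_eq (cols logo_x : Int) (chars : List Char) :
    pvRowFun cols logo_x chars 0 (List.replicate cols.toNat false)
      = (PySem.List.pyRange 0 cols 1).map (fun c =>
          decide ((logo_x ≤ c ∧ c < logo_x + (chars.length : Int)) ∧
                  chars.getD (c - logo_x).toNat ' ' ∉ [' ', '\n', '\r'])) := by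
  apply List.ext_getElem (by simp [pv_length_pvRowFun, PySem.List.length_pyRange_one])
  intro c h1 h2
  have hcn : c < cols.toNat := by
    rw [pv_length_pvRowFun] at h1; simpa using h1
  have hc : (c : Int) < cols := by omega
  rw [← List.getD_eq_getElem _ false h1]
  rw [pv_rowFun_getD _ _ _ _ _ _ hc (by simpa using hcn)]
  rw [List.getElem_map, PySem.List.getElem_pyRange_one]
  simp only [zero_add, sub_zero]
  have hrep : (List.replicate cols.toNat false).getD c false = false := by
    simp [List.getD_eq_getElem?_getD]
  rw [hrep]
  by_cases hb : logo_x ≤ (c : Int) ∧ (c : Int) < logo_x + (chars.length : Int)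
  · by_cases hch : (chars.getD ((c : Int) - logo_x).toNat ' ') ∉ [' ', '\n', '\r']
    · rw [if_pos ⟨by omega, by omega, hch⟩]
      rw [eq_comm, decide_eq_true_eq]
      exact ⟨hb, hch⟩
    · rw [if_neg (fun hh => hch hh.2.2)]
      rw [eq_comm, decide_eq_false_iff_not]
      intro hh
      exact hch hh.2
  · rw [if_neg (by omega)]
    rw [eq_comm, decide_eq_false_iff_not]
    intro hh
    exact hb hh.1

-- ===== VERDICT (by name: the statement is the Claim_ definition above) =====
theorem build_solid_py_spec : Claim_equal_build_solid_py := by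
  intro rows cols logo_lines logo_y logo_x _hdom
  unfold Spec_build_solid_py build_solid_py build_solid_py_alt
  simp only []
  apply List.ext_getElem
  · rw [pv_length_outerFold]
    simp [PySem.List.length_pyRange_one]
  · intro r h1 h2
    have hrn : r < rows.toNat := by
      simp [PySem.List.length_pyRange_one] at h2; omega
    have hr : (r : Int) < rows := by omega
    have hinit : ((PySem.List.pyRange 0 rows 1).map
        (fun _ => List.replicate cols.toNat false)).getD r []
          = List.replicate cols.toNat false := by
      rw [List.getD_eq_getElem _ _ (by simp [PySem.List.length_pyRange_one]; omega)]
      rw [List.getElem_map]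
    rw [← List.getD_eq_getElem _ [] h1]
    rw [pv_outer_getD _ _ _ _ _ _ _ _ hr
        (by simp [PySem.List.length_pyRange_one]; omega)]
    rw [hinit, List.getElem_map, PySem.List.getElem_pyRange_one]
    simp only [zero_add, sub_zero]
    by_cases hb : 0 ≤ (r : Int) - logo_y ∧ (r : Int) - logo_y < (logo_lines.length : Int)
    · rw [if_pos (by constructor <;> omega), if_pos hb]
      rw [pv_row_eq]
    · rw [if_neg (by omega), if_neg hb]
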